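-- pv_equiv track=rewrite | github.com/DipperChen2007/Autistic_enchancer | CCC_junior/2021/J2/J2.py | S_A
-- ===== SOURCE A (Python) =====
-- def S_A(n,lst):
--     biggest = 0
--     winner = ""
--     for i in range(n):
--         if lst[i][1] > biggest:
--             biggest = lst[i][1]
--             winner = lst[i][0]
--     return winner
-- ===== SOURCE B (Python) =====
-- def S_A(n, lst):
--     entries = [lst[i] for i in range(n)]
--     ranked = sorted(entries, key=lambda p: p[1], reverse=True)
--     if ranked and ranked[0][1] > 0:
--         return ranked[0][0]
--     return ""
-- ===== Notes on version B (the rewrite author's own statement) =====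
-- stated objective: alternative
-- what changed: Replaces A's running-max loop with materialising the first n entries, stably sorting them in descending order of value, and picking the top entry if its value is positive (stability preserves A's first-max tie-break).
import Mathlib
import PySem

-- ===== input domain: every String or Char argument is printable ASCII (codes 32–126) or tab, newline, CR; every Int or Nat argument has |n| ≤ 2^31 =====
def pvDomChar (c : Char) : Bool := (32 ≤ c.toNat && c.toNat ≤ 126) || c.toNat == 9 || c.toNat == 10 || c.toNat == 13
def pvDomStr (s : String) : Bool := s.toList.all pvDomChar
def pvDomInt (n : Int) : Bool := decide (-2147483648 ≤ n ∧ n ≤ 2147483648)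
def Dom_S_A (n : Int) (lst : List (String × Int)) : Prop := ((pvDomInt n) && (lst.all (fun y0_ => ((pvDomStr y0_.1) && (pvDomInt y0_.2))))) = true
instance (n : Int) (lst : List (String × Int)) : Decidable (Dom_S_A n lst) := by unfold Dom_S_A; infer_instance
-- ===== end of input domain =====

-- B replaces A's running-max loop with a stable descending sort of the first n entries and picks the top one (alternative decomposition, not faster).


-- ===== PORT A =====
-- for i in range(n): if lst[i][1] > biggest: biggest, winner = lst[i][1], lst[i][0]
-- lst[i] → pyGet?; the .getD ("", 0) only totalizes the IndexError case, which Pre_ excludes.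
def S_A (n : Int) (lst : List (String × Int)) : String :=
  (List.foldl
    (fun (st : Int × String) (i : Int) =>
      let p := (PySem.List.pyGet? lst i).getD ("", 0)
      if p.2 > st.1 then (p.2, p.1) else st)
    (0, "") (PySem.List.pyRange 0 n 1)).2

-- ===== PORT B =====
def S_A_alt (n : Int) (lst : List (String × Int)) : String :=
  let entries := (PySem.List.pyRange 0 n 1).map
    (fun i => (PySem.List.pyGet? lst i).getD ("", 0))
  match PySem.List.sorted entries (fun p => p.2) true with
  | [] => ""
  | top :: _ => if top.2 > 0 then top.1 else ""

-- ===== PRECONDITION & SPEC =====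
-- A indexes lst[i] for i in range(n): it raises IndexError exactly when n > len(lst).
def Pre_S_A (n : Int) (lst : List (String × Int)) : Prop := n ≤ (lst.length : Int)
instance (n : Int) (lst : List (String × Int)) : Decidable (Pre_S_A n lst) := by unfold Pre_S_A; infer_instance
def pvWitness_S_A : Int × (List (String × Int)) := (2, [("a", 3), ("b", 1)])

def Spec_S_A (n : Int) (lst : List (String × Int)) (out : String) : Prop := out = S_A_alt n lst
instance (n : Int) (lst : List (String × Int)) (out : String) : Decidable (Spec_S_A n lst out) := by unfold Spec_S_A; infer_instance

-- ===== CLAIM (what is proved, stated in full; the proofs are below) =====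
def Claim_equal_S_A : Prop := ∀ (n : Int) (lst : List (String × Int)), Dom_S_A n lst → Pre_S_A n lst → Spec_S_A n lst (S_A n lst)

-- ===== LEMMAS AND PROOFS =====

-- A's loop body, over an already-materialised entry
def pvStep (st : Int × String) (p : String × Int) : Int × String :=
  if p.2 > st.1 then (p.2, p.1) else st

-- A's final (biggest, winner) state, read off the head of the descending sort
def pvHeadState : List (String × Int) → Int × String
  | [] => (0, "")
  | h :: _ => if 0 < h.2 then (h.2, h.1) else (0, "")

theorem pvFoldl_eq_headState (es : List (String × Int)) :
    es.foldl pvStep (0, "") = pvHeadState (PySem.List.sorted es (fun p => p.2) true) := by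
  induction es using List.reverseRecOn with
  | nil => rfl
  | append_singleton es e ih =>
    rw [List.foldl_append, List.foldl_cons, List.foldl_nil, ih]
    have hins : PySem.List.sorted (es ++ [e]) (fun p => p.2) true
        = PySem.List.insertBy (fun a b => decide (b.2 < a.2)) e
            (PySem.List.sorted es (fun p => p.2) true) := by
      rw [PySem.List.sorted_rev_eq_foldl_insertBy, PySem.List.sorted_rev_eq_foldl_insertBy,
          List.foldl_append, List.foldl_cons, List.foldl_nil]
    rw [hins]
    cases hs : PySem.List.sorted es (fun p => p.2) true with
    | nil =>
      simp [pvHeadState, pvStep, PySem.List.insertBy]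
    | cons h t =>
      by_cases hbe : h.2 < e.2
      · rw [show PySem.List.insertBy (fun a b => decide (b.2 < a.2)) e (h :: t)
              = e :: h :: t by simp [PySem.List.insertBy, hbe]]
        simp only [pvStep, pvHeadState]
        split_ifs <;> first | rfl | (exfalso; omega)
      · rw [show PySem.List.insertBy (fun a b => decide (b.2 < a.2)) e (h :: t)
              = h :: PySem.List.insertBy (fun a b => decide (b.2 < a.2)) e t by
            simp [PySem.List.insertBy, hbe]]
        simp only [pvStep, pvHeadState]
        split_ifs <;> first | rfl | (exfalso; omega)

theorem S_A_eq_alt (n : Int) (lst : List (String × Int)) : S_A n lst = S_A_alt n lst := by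
  unfold S_A S_A_alt
  rw [show (fun (st : Int × String) (i : Int) =>
        let p := (PySem.List.pyGet? lst i).getD ("", 0)
        if p.2 > st.1 then (p.2, p.1) else st)
      = (fun st i => pvStep st ((PySem.List.pyGet? lst i).getD ("", 0))) from rfl,
      ← List.foldl_map, pvFoldl_eq_headState]
  show (pvHeadState (PySem.List.sorted
      ((PySem.List.pyRange 0 n 1).map (fun i => (PySem.List.pyGet? lst i).getD ("", 0)))
      (fun p => p.2) true)).2
    = match PySem.List.sorted
        ((PySem.List.pyRange 0 n 1).map (fun i => (PySem.List.pyGet? lst i).getD ("", 0)))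
        (fun p => p.2) true with
      | [] => ""
      | top :: _ => if top.2 > 0 then top.1 else ""
  generalize PySem.List.sorted
      ((PySem.List.pyRange 0 n 1).map (fun i => (PySem.List.pyGet? lst i).getD ("", 0)))
      (fun p => p.2) true = s
  cases s with
  | nil => rfl
  | cons h t => simp only [pvHeadState]; split_ifs with hh <;> simp

-- ===== VERDICT (by name: the statement is the Claim_ definition above) =====
theorem S_A_spec : Claim_equal_S_A := by
  intro n lst _ _
  unfold Spec_S_A
  exact S_A_eq_alt n lst
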